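-- pv_equiv track=rewrite | github.com/Willow-Voice/SymSpellSwift | scripts/generate_keyboard_layout.py | get_adjacent_keys
-- ===== SOURCE A (Python) =====
-- from typing import Dict, List, Set, Tuple
--
-- def get_key_positions(rows: List[List[str]]) -> Dict[str, Tuple[int, int]]:
--     """
--     Get (row, col) position for each key.
--
--     Handles staggered keyboard layout - rows are offset by ~0.5 keys.
--     We use half-key precision internally: col is doubled for accurate distance.
--     """
--     positions = {}
--
--     # Row offsets to simulate keyboard stagger (in half-key units)
--     # Top row: no offset
--     # Middle row: offset by 0.5 keys (1 half-key)
--     # Bottom row: offset by 1 key (2 half-keys)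
--     row_offsets = [0, 1, 3]
--
--     for row_idx, row in enumerate(rows):
--         offset = row_offsets[row_idx] if row_idx < len(row_offsets) else row_idx * 2
--         for col_idx, key in enumerate(row):
--             # Use half-key precision: multiply col by 2
--             positions[key] = (row_idx * 2, col_idx * 2 + offset)
--
--     return positions
--
-- def compute_distance_matrix(rows: List[List[str]], max_distance: int = 2) -> List[List[int]]:
--     """
--     Compute keyboard distance matrix for all letter pairs.
--
--     Returns 26x26 matrix where matrix[i][j] is the keyboard distance
--     from letter chr(ord('a') + i) to letter chr(ord('a') + j).
--
--     Distance is computed using Chebyshev distance (max of row/col diff)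
--     with keyboard stagger accounted for.
--     """
--     positions = get_key_positions(rows)
--
--     # Initialize 26x26 matrix with 255 (far away)
--     matrix = [[255 for _ in range(26)] for _ in range(26)]
--
--     for i in range(26):
--         char_i = chr(ord('a') + i)
--
--         for j in range(26):
--             char_j = chr(ord('a') + j)
--
--             if i == j:
--                 # Same key
--                 matrix[i][j] = 0
--             elif char_i in positions and char_j in positions:
--                 pos_i = positions[char_i]
--                 pos_j = positions[char_j]
--
--                 # Compute distance using Chebyshev distance
--                 # (accounts for diagonal adjacency)
--                 row_diff = abs(pos_i[0] - pos_j[0])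
--                 col_diff = abs(pos_i[1] - pos_j[1])
--
--                 # Convert from half-key units to key units
--                 # Adjacent keys differ by ~2 half-key units
--                 chebyshev = max(row_diff, col_diff)
--
--                 if chebyshev <= 2:
--                     # Distance 1: immediately adjacent
--                     matrix[i][j] = 1
--                 elif chebyshev <= 4:
--                     # Distance 2: one key away
--                     matrix[i][j] = 2
--                 else:
--                     # Far away
--                     matrix[i][j] = 255
--             # else: not on keyboard, stays 255
--
--     return matrix
--
-- def get_adjacent_keys(rows: List[List[str]]) -> Dict[str, Set[str]]:
--     """Get set of adjacent keys for each key (for debugging/verification)."""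
--     matrix = compute_distance_matrix(rows)
--     adjacent = {}
--
--     for i in range(26):
--         char_i = chr(ord('a') + i)
--         neighbors = set()
--         for j in range(26):
--             if matrix[i][j] == 1:
--                 neighbors.add(chr(ord('a') + j))
--         adjacent[char_i] = neighbors
--
--     return adjacent
-- ===== SOURCE B (Python) =====
-- def get_adjacent_keys(rows):
--     """Symmetric pair sweep: each unordered pair of on-keyboard letters is tested once,
--     recording the neighbour relation in both directions; no distance matrix."""
--     positions = {}
--     row_offsets = [0, 1, 3]
--     for row_idx, row in enumerate(rows):
--         offset = row_offsets[row_idx] if row_idx < 3 else row_idx * 2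
--         for col_idx, key in enumerate(row):
--             positions[key] = (row_idx * 2, col_idx * 2 + offset)
--
--     adjacent = {chr(ord('a') + i): set() for i in range(26)}
--     rest = [c for c in adjacent if c in positions]
--     while rest:
--         ci, rest = rest[0], rest[1:]
--         ri, ci_col = positions[ci]
--         for cj in rest:
--             rj, cj_col = positions[cj]
--             if max(abs(ri - rj), abs(ci_col - cj_col)) <= 2:
--                 adjacent[ci].add(cj)
--                 adjacent[cj].add(ci)
--     return adjacent
-- ===== Notes on version B (the rewrite author's own statement) =====
-- stated objective: alternative
-- what changed: B drops A's 26x26 distance matrix and its all-pairs i,j scan entirely: it pre-filters the letters actually on the keyboard and does one symmetric sweep over unordered pairs (head vs tail of the remaining list), testing each pair once and recording adjacency in both directions.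
import Mathlib
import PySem

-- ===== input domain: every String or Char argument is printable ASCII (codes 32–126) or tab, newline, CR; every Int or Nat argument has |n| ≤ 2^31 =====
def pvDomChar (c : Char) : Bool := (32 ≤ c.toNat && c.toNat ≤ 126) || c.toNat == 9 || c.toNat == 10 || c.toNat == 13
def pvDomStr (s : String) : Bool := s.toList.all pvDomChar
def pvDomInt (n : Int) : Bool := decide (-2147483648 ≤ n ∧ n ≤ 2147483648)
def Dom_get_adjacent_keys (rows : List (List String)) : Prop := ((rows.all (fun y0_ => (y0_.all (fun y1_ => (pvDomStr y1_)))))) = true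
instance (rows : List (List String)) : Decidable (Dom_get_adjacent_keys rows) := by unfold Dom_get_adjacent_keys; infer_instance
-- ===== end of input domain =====

-- B replaces A's 26x26 distance matrix and double full scan by one symmetric sweep over
-- unordered pairs of the on-keyboard letters (objective: alternative).


-- ===== PORT A =====

-- chr(ord('a') + i) for 0 ≤ i < 26 (the ports only call it on that range, where it is exact)
def pvLetter (i : Int) : String := String.ofList [Char.ofNat (97 + i.toNat)]

-- matrix[i][j] = v for in-range nonneg i, j (the ports only mutate in-range entries)
def pvMset (m : List (List Int)) (i j : Int) (v : Int) : List (List Int) :=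
  m.modify i.toNat (fun r => r.set j.toNat v)

-- matrix[i][j] read; the defaults are never reached on the in-range indices the ports use
def pvMGet (m : List (List Int)) (i j : Int) : Int :=
  PySem.List.pyGetD (PySem.List.pyGetD m i []) j 255

-- positions = {}; for row_idx, row in enumerate(rows): … positions[key] = (row_idx*2, col_idx*2+offset)
-- (row_offsets[row_idx] is guarded by row_idx < len(row_offsets), so the pyGetD default is never used)
def get_key_positions (rows : List (List String)) : PySem.Dict String (Int × Int) :=
  (PySem.List.enumerate rows 0).foldl (fun positions p =>
    let row_idx := p.1
    let offset : Int := if row_idx < 3 then PySem.List.pyGetD ([0, 1, 3] : List Int) row_idx 0 else row_idx * 2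
    (PySem.List.enumerate p.2 0).foldl (fun positions q =>
      positions.insert q.2 (row_idx * 2, q.1 * 2 + offset)) positions)
    PySem.Dict.empty

-- [[255 for _ in range(26)] for _ in range(26)]
def pvMatrix0 : List (List Int) :=
  (PySem.List.pyRange 0 26 1).map (fun _ => (PySem.List.pyRange 0 26 1).map (fun _ => (255 : Int)))

-- the max_distance parameter is unused by the Python body (it hardcodes 2 and 4); kept for fidelity
-- (positions[char_i]/[char_j] are guarded by 'in positions', so the getD defaults are never used)
def compute_distance_matrix (rows : List (List String)) (_max_distance : Int) : List (List Int) :=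
  let positions := get_key_positions rows
  (PySem.List.pyRange 0 26 1).foldl (fun matrix i =>
    let char_i := pvLetter i
    (PySem.List.pyRange 0 26 1).foldl (fun matrix j =>
      let char_j := pvLetter j
      if i = j then pvMset matrix i j 0
      else if positions.contains char_i && positions.contains char_j then
        let pos_i := positions.getD char_i (0, 0)
        let pos_j := positions.getD char_j (0, 0)
        let row_diff := |pos_i.1 - pos_j.1|
        let col_diff := |pos_i.2 - pos_j.2|
        let chebyshev := max row_diff col_diff
        if chebyshev ≤ 2 then pvMset matrix i j 1
        else if chebyshev ≤ 4 then pvMset matrix i j 2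
        else pvMset matrix i j 255
      else matrix) matrix) pvMatrix0

def get_adjacent_keys (rows : List (List String)) : List (String × List String) :=
  let matrix := compute_distance_matrix rows 2
  ((PySem.List.pyRange 0 26 1).foldl (fun adjacent i =>
    let char_i := pvLetter i
    let neighbors : PySem.Set String :=
      (PySem.List.pyRange 0 26 1).foldl (fun neighbors j =>
        if pvMGet matrix i j = 1 then PySem.Set.add neighbors (pvLetter j) else neighbors)
        PySem.Set.empty
    adjacent.insert char_i neighbors)
    (PySem.Dict.empty : PySem.Dict String (PySem.Set String))).items

-- ===== PORT B =====

-- while rest: ci, rest = rest[0], rest[1:]; for cj in rest: … — the symmetric pair sweep of Source B.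
-- ci and cj are always keys of adjacent and of positions (rest is filtered by 'c in positions'
-- and drawn from adjacent's keys), so the getD/modify defaults are never used.
def pvSweep (positions : PySem.Dict String (Int × Int))
    (adjacent : PySem.Dict String (PySem.Set String)) :
    List String → PySem.Dict String (PySem.Set String)
  | [] => adjacent
  | ci :: rest =>
    let pi := positions.getD ci (0, 0)
    pvSweep positions
      (rest.foldl (fun adjacent cj =>
        let pj := positions.getD cj (0, 0)
        if max |pi.1 - pj.1| |pi.2 - pj.2| ≤ 2 then
          (adjacent.modify ci PySem.Set.empty (fun s => PySem.Set.add s cj)).modify cj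
            PySem.Set.empty (fun s => PySem.Set.add s ci)
        else adjacent) adjacent)
      rest

def get_adjacent_keys_alt (rows : List (List String)) : List (String × List String) :=
  let positions : PySem.Dict String (Int × Int) :=
    (PySem.List.enumerate rows 0).foldl (fun positions p =>
      let row_idx := p.1
      let offset : Int := if row_idx < 3 then PySem.List.pyGetD ([0, 1, 3] : List Int) row_idx 0 else row_idx * 2
      (PySem.List.enumerate p.2 0).foldl (fun positions q =>
        positions.insert q.2 (row_idx * 2, q.1 * 2 + offset)) positions)
      PySem.Dict.empty
  let adjacent : PySem.Dict String (PySem.Set String) :=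
    (PySem.List.pyRange 0 26 1).foldl (fun d i => d.insert (pvLetter i) PySem.Set.empty)
      PySem.Dict.empty
  let rest := adjacent.keys.filter (fun c => positions.contains c)
  (pvSweep positions adjacent rest).items

-- ===== PRECONDITION & SPEC =====
def Spec_get_adjacent_keys (rows : List (List String)) (out : List (String × List String)) : Prop := out = get_adjacent_keys_alt rows
instance (rows : List (List String)) (out : List (String × List String)) : Decidable (Spec_get_adjacent_keys rows out) := by unfold Spec_get_adjacent_keys; infer_instance

-- ===== CLAIM (what is proved, stated in full; the proofs are below) =====
def Claim_equal_get_adjacent_keys : Prop := ∀ (rows : List (List String)), Dom_get_adjacent_keys rows → Spec_get_adjacent_keys rows (get_adjacent_keys rows)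

-- ===== LEMMAS AND PROOFS =====

-- the 26 letters, the Chebyshev-adjacency test, A's per-letter neighbor list, B's pair sweep output
def pvLetters : List String := (PySem.List.pyRange 0 26 1).map pvLetter

def pvQ (P : PySem.Dict String (Int × Int)) (x y : String) : Bool :=
  decide (max |(P.getD x (0, 0)).1 - (P.getD y (0, 0)).1|
              |(P.getD x (0, 0)).2 - (P.getD y (0, 0)).2| ≤ 2)

def pvCondL (P : PySem.Dict String (Int × Int)) (ci cj : String) : Bool :=
  cj != ci && P.contains ci && P.contains cj && pvQ P ci cj

def pvN (P : PySem.Dict String (Int × Int)) (c : String) : List String :=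
  pvLetters.filter (fun y => pvCondL P c y)

-- what the sweep appends to each letter's set, pair by pair
def pvPairs (P : PySem.Dict String (Int × Int)) : List String → String → List String
  | [], _ => []
  | x :: rest, c =>
    if c = x then rest.filter (fun y => pvQ P x y)
    else (if rest.contains c && pvQ P x c then [x] else []) ++ pvPairs P rest c

-- ---- A-side machinery (unchanged from the matrix analysis) ----

def pvShape (m : List (List Int)) : Prop := m.length = 26 ∧ ∀ r ∈ m, r.length = 26

def pvEntry (P : PySem.Dict String (Int × Int)) (i j : Int) : Int :=
  if i = j then 0
  else if P.contains (pvLetter i) && P.contains (pvLetter j) then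
    let pos_i := P.getD (pvLetter i) (0, 0)
    let pos_j := P.getD (pvLetter j) (0, 0)
    let chebyshev := max |pos_i.1 - pos_j.1| |pos_i.2 - pos_j.2|
    if chebyshev ≤ 2 then 1 else if chebyshev ≤ 4 then 2 else 255
  else 255

def pvCond (P : PySem.Dict String (Int × Int)) (i j : Int) : Bool :=
  decide (i = j) || (P.contains (pvLetter i) && P.contains (pvLetter j))

theorem pvShape_mset (m : List (List Int)) (i j v : Int) (h : pvShape m) : pvShape (pvMset m i j v) := by
  obtain ⟨h1, h2⟩ := h
  refine ⟨by simp [pvMset, h1], ?_⟩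
  intro r hr
  rw [List.mem_iff_getElem] at hr
  obtain ⟨k, hk, hr⟩ := hr
  simp only [pvMset] at hk hr
  rw [List.getElem_modify] at hr
  split at hr
  · rw [← hr]; simp; exact h2 _ (List.getElem_mem _)
  · rw [← hr]; exact h2 _ (List.getElem_mem _)

theorem pvMGet_mset (m : List (List Int)) (i j i' j' v : Int)
    (h : pvShape m) (hi : 0 ≤ i ∧ i < 26) (hj : 0 ≤ j ∧ j < 26)
    (hi' : 0 ≤ i' ∧ i' < 26) (hj' : 0 ≤ j' ∧ j' < 26) :
    pvMGet (pvMset m i j v) i' j' = if i' = i ∧ j' = j then v else pvMGet m i' j' := by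
  obtain ⟨h1, h2⟩ := h
  have hil : (i' : Int) < ((pvMset m i j v).length : Int) := by simp [pvMset, h1]; omega
  have hil' : (i' : Int) < (m.length : Int) := by simp [h1]; omega
  rw [pvMGet, PySem.List.pyGetD_eq_getElem _ _ hi'.1 hil]
  rw [pvMGet, PySem.List.pyGetD_eq_getElem _ _ hi'.1 hil']
  simp only [pvMset]
  rw [List.getElem_modify]
  by_cases hii : i.toNat = i'.toNat
  · rw [if_pos hii]
    have hrl : (m[i'.toNat]).length = 26 := h2 _ (List.getElem_mem _)
    have hjl : (j' : Int) < (((m[i'.toNat]).set j.toNat v).length : Int) := by simp [hrl]; omega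
    have hjl' : (j' : Int) < ((m[i'.toNat]).length : Int) := by simp [hrl]; omega
    rw [PySem.List.pyGetD_eq_getElem _ _ hj'.1 hjl, PySem.List.pyGetD_eq_getElem _ _ hj'.1 hjl']
    rw [List.getElem_set]
    by_cases hjj : j.toNat = j'.toNat
    · rw [if_pos hjj, if_pos ⟨by omega, by omega⟩]
    · rw [if_neg hjj, if_neg (by omega)]
  · rw [if_neg hii, if_neg (by omega)]

theorem pvInner_fold (C : Int → Bool) (V : Int → Int) (i : Int) (js : List Int)
    (m : List (List Int)) (hm : pvShape m)
    (hjs : ∀ x ∈ js, 0 ≤ x ∧ x < 26) (hi : 0 ≤ i ∧ i < 26)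
    (i' j' : Int) (hi' : 0 ≤ i' ∧ i' < 26) (hj' : 0 ≤ j' ∧ j' < 26) :
    pvMGet (js.foldl (fun m j => if C j then pvMset m i j (V j) else m) m) i' j'
      = if i' = i ∧ j' ∈ js ∧ C j' then V j' else pvMGet m i' j' := by
  induction js generalizing m with
  | nil => simp
  | cons j0 rest ih =>
    have hj0 := hjs j0 (by simp)
    have hrest : ∀ x ∈ rest, 0 ≤ x ∧ x < 26 := fun x hx => hjs x (by simp [hx])
    have hm' : pvShape (if C j0 then pvMset m i j0 (V j0) else m) := by
      split <;> [exact pvShape_mset _ _ _ _ hm; exact hm]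
    rw [List.foldl_cons, ih _ hm' hrest]
    by_cases hrm : i' = i ∧ j' ∈ rest ∧ C j' = true
    · rw [if_pos hrm, if_pos ⟨hrm.1, by simp [hrm.2.1], hrm.2.2⟩]
    · rw [if_neg hrm]
      by_cases hc0 : C j0
      · rw [if_pos hc0, pvMGet_mset _ _ _ _ _ _ hm hi hj0 hi' hj']
        by_cases hh : i' = i ∧ j' = j0
        · rw [if_pos hh, if_pos ⟨hh.1, by simp [hh.2], hh.2 ▸ hc0⟩, hh.2]
        · rw [if_neg hh, if_neg (by intro ⟨a, b, c⟩; simp at b; rcases b with b | b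
                                    · exact hh ⟨a, b⟩
                                    · exact hrm ⟨a, b, c⟩)]
      · simp only [if_neg hc0, Bool.not_eq_true] at *
        rw [if_neg (by intro ⟨a, b, c⟩; simp at b; rcases b with b | b
                       · subst b; simp [c] at hc0
                       · exact hrm ⟨a, b, c⟩)]

theorem pvShape_inner_fold (C : Int → Bool) (V : Int → Int) (i : Int) (js : List Int)
    (m : List (List Int)) (hm : pvShape m) :
    pvShape (js.foldl (fun m j => if C j then pvMset m i j (V j) else m) m) := by
  induction js generalizing m with
  | nil => exact hm
  | cons j0 rest ih =>
    rw [List.foldl_cons]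
    exact ih _ (by split <;> [exact pvShape_mset _ _ _ _ hm; exact hm])

theorem pvOuter_fold (C : Int → Int → Bool) (V : Int → Int → Int) (is : List Int)
    (m : List (List Int)) (hm : pvShape m) (his : ∀ x ∈ is, 0 ≤ x ∧ x < 26)
    (i' j' : Int) (hi' : 0 ≤ i' ∧ i' < 26) (hj' : 0 ≤ j' ∧ j' < 26) :
    pvMGet (is.foldl (fun m i => (PySem.List.pyRange 0 26 1).foldl
        (fun m j => if C i j then pvMset m i j (V i j) else m) m) m) i' j'
      = if i' ∈ is ∧ C i' j' then V i' j' else pvMGet m i' j' := by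
  have hrng : ∀ x ∈ PySem.List.pyRange 0 26 1, 0 ≤ x ∧ x < 26 := by
    intro x hx; rw [PySem.List.mem_pyRange_one] at hx; exact hx
  induction is generalizing m with
  | nil => simp
  | cons i0 rest ih =>
    have hi0 := his i0 (by simp)
    have hrest : ∀ x ∈ rest, 0 ≤ x ∧ x < 26 := fun x hx => his x (by simp [hx])
    have hm' := pvShape_inner_fold (C i0) (V i0) i0 (PySem.List.pyRange 0 26 1) m hm
    rw [List.foldl_cons, ih _ hm' hrest,
        pvInner_fold (C i0) (V i0) i0 _ m hm hrng hi0 i' j' hi' hj']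
    have hjmem : j' ∈ PySem.List.pyRange 0 26 1 := by rw [PySem.List.mem_pyRange_one]; omega
    by_cases hrm : i' ∈ rest ∧ C i' j' = true
    · rw [if_pos hrm, if_pos ⟨by simp [hrm.1], hrm.2⟩]
    · rw [if_neg hrm]
      by_cases hh : i' = i0 ∧ C i' j' = true
      · rw [if_pos ⟨hh.1, hjmem, hh.1 ▸ hh.2⟩, if_pos ⟨by simp [hh.1], hh.2⟩, hh.1]
      · rw [if_neg (by intro ⟨a, _, c⟩; exact hh ⟨a, a ▸ c⟩),
            if_neg (by intro ⟨a, c⟩; simp at a; rcases a with a | a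
                       · exact hh ⟨a, c⟩
                       · exact hrm ⟨a, c⟩)]

theorem pvMatrix0_eq : pvMatrix0 = List.replicate 26 (List.replicate 26 255) := by decide

theorem pvShape_matrix0 : pvShape pvMatrix0 := by
  rw [pvMatrix0_eq]; exact ⟨by simp, by intro r hr; simp at hr; simp [hr]⟩

theorem pvMGet_matrix0 (i j : Int) (hi : 0 ≤ i ∧ i < 26) (hj : 0 ≤ j ∧ j < 26) :
    pvMGet pvMatrix0 i j = 255 := by
  rw [pvMatrix0_eq, pvMGet, PySem.List.pyGetD_eq_getElem _ _ hi.1 (by simp; omega)]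
  rw [List.getElem_replicate, PySem.List.pyGetD_eq_getElem _ _ hj.1 (by simp; omega)]
  rw [List.getElem_replicate]

theorem pvEntry_cdm (rows : List (List String)) (i j : Int)
    (hi : 0 ≤ i ∧ i < 26) (hj : 0 ≤ j ∧ j < 26) :
    pvMGet (compute_distance_matrix rows 2) i j = pvEntry (get_key_positions rows) i j := by
  set P := get_key_positions rows with hPdef
  have hrng : ∀ x ∈ PySem.List.pyRange 0 26 1, 0 ≤ x ∧ x < 26 := by
    intro x hx; rw [PySem.List.mem_pyRange_one] at hx; exact hx
  show pvMGet ((PySem.List.pyRange 0 26 1).foldl (fun matrix i =>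
      (PySem.List.pyRange 0 26 1).foldl (fun matrix j =>
        if i = j then pvMset matrix i j 0
        else if P.contains (pvLetter i) && P.contains (pvLetter j) then
          if max |(P.getD (pvLetter i) (0,0)).1 - (P.getD (pvLetter j) (0,0)).1|
                 |(P.getD (pvLetter i) (0,0)).2 - (P.getD (pvLetter j) (0,0)).2| ≤ 2
          then pvMset matrix i j 1
          else if max |(P.getD (pvLetter i) (0,0)).1 - (P.getD (pvLetter j) (0,0)).1|
                      |(P.getD (pvLetter i) (0,0)).2 - (P.getD (pvLetter j) (0,0)).2| ≤ 4
          then pvMset matrix i j 2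
          else pvMset matrix i j 255
        else matrix) matrix) pvMatrix0) i j = pvEntry P i j
  have hbody : ∀ (i' : Int) (mm : List (List Int)) (j' : Int),
      (if i' = j' then pvMset mm i' j' 0
        else if P.contains (pvLetter i') && P.contains (pvLetter j') then
          if max |(P.getD (pvLetter i') (0,0)).1 - (P.getD (pvLetter j') (0,0)).1|
                 |(P.getD (pvLetter i') (0,0)).2 - (P.getD (pvLetter j') (0,0)).2| ≤ 2
          then pvMset mm i' j' 1
          else if max |(P.getD (pvLetter i') (0,0)).1 - (P.getD (pvLetter j') (0,0)).1|
                      |(P.getD (pvLetter i') (0,0)).2 - (P.getD (pvLetter j') (0,0)).2| ≤ 4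
          then pvMset mm i' j' 2
          else pvMset mm i' j' 255
        else mm)
      = (if pvCond P i' j' then pvMset mm i' j' (pvEntry P i' j') else mm) := by
    intro i' mm j'
    by_cases he : i' = j'
    · simp [pvCond, pvEntry, he]
    · by_cases hb : (P.contains (pvLetter i') && P.contains (pvLetter j')) = true
      · simp only [pvCond, pvEntry, if_neg he, hb, Bool.or_true, if_true]
        split_ifs <;> rfl
      · simp [pvCond, he, hb]
  have hstep : ∀ (mm : List (List Int)), ∀ i' ∈ PySem.List.pyRange 0 26 1,
      ((PySem.List.pyRange 0 26 1).foldl (fun matrix j' =>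
        if i' = j' then pvMset matrix i' j' 0
        else if P.contains (pvLetter i') && P.contains (pvLetter j') then
          if max |(P.getD (pvLetter i') (0,0)).1 - (P.getD (pvLetter j') (0,0)).1|
                 |(P.getD (pvLetter i') (0,0)).2 - (P.getD (pvLetter j') (0,0)).2| ≤ 2
          then pvMset matrix i' j' 1
          else if max |(P.getD (pvLetter i') (0,0)).1 - (P.getD (pvLetter j') (0,0)).1|
                      |(P.getD (pvLetter i') (0,0)).2 - (P.getD (pvLetter j') (0,0)).2| ≤ 4
          then pvMset matrix i' j' 2
          else pvMset matrix i' j' 255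
        else matrix) mm)
      = ((PySem.List.pyRange 0 26 1).foldl (fun matrix j' =>
          if pvCond P i' j' then pvMset matrix i' j' (pvEntry P i' j') else matrix) mm) := by
    intro mm i' _
    exact PySem.List.foldl_congr_mem _ _ _ _ (fun acc x _ => hbody i' acc x)
  rw [PySem.List.foldl_congr_mem _ _ _ _ hstep]
  rw [pvOuter_fold (pvCond P) (pvEntry P) _ _ pvShape_matrix0 hrng i j hi hj]
  have him : i ∈ PySem.List.pyRange 0 26 1 := by rw [PySem.List.mem_pyRange_one]; omega
  by_cases hc : pvCond P i j = true
  · rw [if_pos ⟨him, hc⟩]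
  · rw [if_neg (by intro ⟨_, c⟩; exact hc c), pvMGet_matrix0 i j hi hj]
    simp only [pvCond, Bool.or_eq_true, decide_eq_true_eq, not_or] at hc
    rw [pvEntry, if_neg (by tauto), if_neg (by simpa using hc.2)]

theorem pvLetter_inj_fin : ∀ a b : Fin 26, pvLetter a.val = pvLetter b.val → a = b := by decide

theorem pvLetter_inj (i j : Int) (hi : 0 ≤ i ∧ i < 26) (hj : 0 ≤ j ∧ j < 26) :
    pvLetter i = pvLetter j ↔ i = j := by
  constructor
  · intro h
    have hii : pvLetter ((i.toNat : Nat) : Int) = pvLetter i := by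
      have h' : ((i.toNat : Nat) : Int).toNat = i.toNat := by omega
      simp only [pvLetter, h']
    have hjj : pvLetter ((j.toNat : Nat) : Int) = pvLetter j := by
      have h' : ((j.toNat : Nat) : Int).toNat = j.toNat := by omega
      simp only [pvLetter, h']
    have := pvLetter_inj_fin ⟨i.toNat, by omega⟩ ⟨j.toNat, by omega⟩
      (hii.trans (h.trans hjj.symm))
    have hv := congrArg Fin.val this
    simp at hv
    omega
  · intro h; rw [h]

theorem pvCondB (P : PySem.Dict String (Int × Int)) (i j : Int)
    (hi : 0 ≤ i ∧ i < 26) (hj : 0 ≤ j ∧ j < 26) :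
    decide (pvEntry P i j = 1) = pvCondL P (pvLetter i) (pvLetter j) := by
  by_cases he : i = j
  · subst he
    simp [pvEntry, pvCondL]
  · have hne : pvLetter j != pvLetter i := by
      simp [bne_iff_ne]
      intro h; exact he ((pvLetter_inj j i hj hi).mp h).symm
    by_cases hci : P.contains (pvLetter i) = true
    · by_cases hcj : P.contains (pvLetter j) = true
      · simp only [pvEntry, pvCondL, pvQ, if_neg he, hci, hcj, Bool.and_true, hne, Bool.true_and]
        by_cases hch : max |(P.getD (pvLetter i) (0, 0)).1 - (P.getD (pvLetter j) (0, 0)).1|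
                           |(P.getD (pvLetter i) (0, 0)).2 - (P.getD (pvLetter j) (0, 0)).2| ≤ 2
        · simp [hch]
        · rw [if_neg hch]; split_ifs with h4 <;> simp [hch]
      · simp [pvEntry, pvCondL, he, hci, hcj]
    · simp [pvEntry, pvCondL, he, hci]

-- concrete facts about the 26 letters
theorem pvLetters_nodup : pvLetters.Nodup := by decide

-- Set.ofList / foldl add over fresh distinct elements appends them verbatim
theorem pvAdd_fresh (s : PySem.Set String) (x : String) (h : x ∉ s) :
    PySem.Set.add s x = s ++ [x] := by
  simp [PySem.Set.add, h]

theorem pvFoldl_add_of_fresh (xs : List String) (s : PySem.Set String)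
    (hnd : xs.Nodup) (hf : ∀ x ∈ xs, x ∉ s) :
    xs.foldl PySem.Set.add s = s ++ xs := by
  induction xs generalizing s with
  | nil => simp
  | cons x rest ih =>
    rw [List.foldl_cons, pvAdd_fresh s x (hf x (by simp)),
        ih (s ++ [x]) (List.Nodup.of_cons hnd), List.append_assoc]
    · rfl
    · intro y hy
      have hy1 : y ∉ s := hf y (by simp [hy])
      have hyx : y ≠ x := by
        intro h; subst h; exact (List.nodup_cons.mp hnd).1 hy
      simp [hy1, hyx]

-- A's result as an explicit association list
theorem pvA_items (rows : List (List String)) :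
    get_adjacent_keys rows = pvLetters.map (fun c => (c, pvN (get_key_positions rows) c)) := by
  have hrng : ∀ x ∈ PySem.List.pyRange 0 26 1, 0 ≤ x ∧ x < 26 := by
    intro x hx; rw [PySem.List.mem_pyRange_one] at hx; exact hx
  simp only [get_adjacent_keys]
  set P := get_key_positions rows with hP
  have hval : ∀ (acc : PySem.Dict String (PySem.Set String)), ∀ i ∈ PySem.List.pyRange 0 26 1,
      (acc.insert (pvLetter i) ((PySem.List.pyRange 0 26 1).foldl (fun neighbors j =>
        if pvMGet (compute_distance_matrix rows 2) i j = 1 then PySem.Set.add neighbors (pvLetter j)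
        else neighbors) PySem.Set.empty))
      = acc.insert (pvLetter i) (pvN P (pvLetter i)) := by
    intro acc i hi
    congr 1
    rw [PySem.List.foldl_congr_mem _ _ (fun neighbors j =>
        if pvEntry P i j = 1 then PySem.Set.add neighbors (pvLetter j) else neighbors) _
        (by intro acc' j hj
            rw [pvEntry_cdm rows i j (hrng i hi) (hrng j hj)])]
    rw [PySem.List.foldl_ite_eq_foldl_filter]
    have h1 : pvN P (pvLetter i)
        = ((PySem.List.pyRange 0 26 1).filter (fun j => decide (pvEntry P i j = 1))).map pvLetter := by
      rw [pvN, pvLetters, List.filter_map]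
      congr 1
      apply List.filter_congr
      intro j hj
      simp only [Function.comp]
      exact (pvCondB P i j (hrng i hi) (hrng j hj)).symm
    have h2 : List.foldl PySem.Set.add PySem.Set.empty (pvN P (pvLetter i)) = pvN P (pvLetter i) := by
      have := pvFoldl_add_of_fresh (pvN P (pvLetter i)) PySem.Set.empty
        (pvLetters_nodup.filter _) (by intro x _; simp [PySem.Set.empty])
      simpa using this
    calc ((PySem.List.pyRange 0 26 1).filter (fun j => decide (pvEntry P i j = 1))).foldl
            (fun neighbors j => PySem.Set.add neighbors (pvLetter j)) PySem.Set.empty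
        = (((PySem.List.pyRange 0 26 1).filter (fun j => decide (pvEntry P i j = 1))).map
            pvLetter).foldl PySem.Set.add PySem.Set.empty := by rw [List.foldl_map]
      _ = List.foldl PySem.Set.add PySem.Set.empty (pvN P (pvLetter i)) := by rw [← h1]
      _ = pvN P (pvLetter i) := h2
  rw [PySem.List.foldl_congr_mem _ _ _ _ hval]
  rw [PySem.Dict.items_foldl_insert_fresh (PySem.List.pyRange 0 26 1) pvLetter
      (fun i => pvN P (pvLetter i)) PySem.Dict.empty (by intro a _; rfl)
      (by exact pvLetters_nodup)]
  simp only [pvLetters, List.map_map]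
  rfl

-- ---- B-side machinery ----

theorem pvQ_symm (P : PySem.Dict String (Int × Int)) (x y : String) : pvQ P x y = pvQ P y x := by
  simp only [pvQ]
  rw [abs_sub_comm ((P.getD x (0,0)).1), abs_sub_comm ((P.getD x (0,0)).2)]

theorem pvPairs_cons (P : PySem.Dict String (Int × Int)) (x : String) (rest : List String)
    (c : String) :
    pvPairs P (x :: rest) c
      = if c = x then rest.filter (fun y => pvQ P x y)
        else (if rest.contains c && pvQ P x c then [x] else []) ++ pvPairs P rest c := rfl

theorem pvSweep_cons (P : PySem.Dict String (Int × Int))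
    (adj : PySem.Dict String (PySem.Set String)) (ci : String) (rest : List String) :
    pvSweep P adj (ci :: rest)
      = pvSweep P (rest.foldl (fun adjacent cj =>
          if max |(P.getD ci (0,0)).1 - (P.getD cj (0,0)).1|
                 |(P.getD ci (0,0)).2 - (P.getD cj (0,0)).2| ≤ 2 then
            (adjacent.modify ci PySem.Set.empty (fun s => PySem.Set.add s cj)).modify cj
              PySem.Set.empty (fun s => PySem.Set.add s ci)
          else adjacent) adj) rest := rfl

-- one outer step of the sweep: what the inner 'for cj in rest' loop does to every set
theorem pvInnerB (P : PySem.Dict String (Int × Int)) (x : String) (js : List String)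
    (adj : PySem.Dict String (PySem.Set String)) (hnd : js.Nodup) (hx : x ∉ js)
    (H : ∀ c, (c = x ∨ c ∈ js) → ∀ y, (y = x ∨ y ∈ js) → y ∉ adj.getD c PySem.Set.empty)
    (c : String) :
    (js.foldl (fun adjacent cj =>
        if max |(P.getD x (0,0)).1 - (P.getD cj (0,0)).1|
               |(P.getD x (0,0)).2 - (P.getD cj (0,0)).2| ≤ 2 then
          (adjacent.modify x PySem.Set.empty (fun s => PySem.Set.add s cj)).modify cj
            PySem.Set.empty (fun s => PySem.Set.add s x)
        else adjacent) adj).getD c PySem.Set.empty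
      = if c = x then adj.getD x PySem.Set.empty ++ js.filter (fun y => pvQ P x y)
        else adj.getD c PySem.Set.empty ++ (if js.contains c && pvQ P x c then [x] else []) := by
  induction js generalizing adj with
  | nil =>
    by_cases hcx : c = x <;> simp [hcx]
  | cons cj js' ih =>
    have hxcj : x ≠ cj := fun h => hx (by simp [h])
    have hcjjs : cj ∉ js' := (List.nodup_cons.mp hnd).1
    have hnd' : js'.Nodup := (List.nodup_cons.mp hnd).2
    have hxjs' : x ∉ js' := fun h => hx (by simp [h])
    rw [List.foldl_cons]
    by_cases hq : max |(P.getD x (0,0)).1 - (P.getD cj (0,0)).1|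
                     |(P.getD x (0,0)).2 - (P.getD cj (0,0)).2| ≤ 2
    · rw [if_pos hq]
      set A1 := (adj.modify x PySem.Set.empty fun s => PySem.Set.add s cj).modify cj
        PySem.Set.empty (fun s => PySem.Set.add s x) with hA1
      have hgetx : A1.getD x PySem.Set.empty = adj.getD x PySem.Set.empty ++ [cj] := by
        rw [hA1, PySem.Dict.getD_modify, if_neg hxcj, PySem.Dict.getD_modify, if_pos rfl]
        exact pvAdd_fresh _ _ (H x (Or.inl rfl) cj (Or.inr (by simp)))
      have hgetcj : A1.getD cj PySem.Set.empty = adj.getD cj PySem.Set.empty ++ [x] := by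
        rw [hA1, PySem.Dict.getD_modify, if_pos rfl, PySem.Dict.getD_modify, if_neg hxcj.symm]
        exact pvAdd_fresh _ _ (H cj (Or.inr (by simp)) x (Or.inl rfl))
      have hgeto : ∀ c', c' ≠ x → c' ≠ cj → A1.getD c' PySem.Set.empty = adj.getD c' PySem.Set.empty := by
        intro c' h1 h2
        rw [hA1, PySem.Dict.getD_modify, if_neg h2, PySem.Dict.getD_modify, if_neg h1]
      have H' : ∀ c', (c' = x ∨ c' ∈ js') → ∀ y, (y = x ∨ y ∈ js') → y ∉ A1.getD c' PySem.Set.empty := by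
        intro c' hc' y hy
        have hylift : y = x ∨ y ∈ cj :: js' := by
          rcases hy with h | h
          · exact Or.inl h
          · exact Or.inr (by simp [h])
        by_cases hcx' : c' = x
        · subst hcx'
          rw [hgetx]
          intro hmem
          rcases List.mem_append.mp hmem with h | h
          · exact H c' (Or.inl rfl) y hylift h
          · have : y = cj := by simpa using h
            subst this
            rcases hy with h | h
            · exact hxcj h.symm
            · exact hcjjs h
        · have hccj : c' ≠ cj := by
            intro h; subst h
            rcases hc' with h | h
            · exact hcx' h
            · exact hcjjs h
          rw [hgeto c' hcx' hccj]
          exact H c' (by rcases hc' with h | h; exact Or.inl h; exact Or.inr (by simp [h])) y hylift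
      rw [ih A1 hnd' hxjs' H']
      by_cases hcx : c = x
      · subst hcx
        rw [if_pos rfl, if_pos rfl, hgetx, List.filter_cons,
            if_pos (by simp [pvQ, hq]), List.append_assoc]
        rfl
      · rw [if_neg hcx, if_neg hcx]
        by_cases hccj : c = cj
        · subst hccj
          rw [hgetcj]
          simp [pvQ, hq, hcjjs]
        · rw [hgeto c hcx hccj]
          have : (cj :: js').contains c = js'.contains c := by
            simp [hccj]
          rw [this]
    · rw [if_neg hq]
      have H'' : ∀ c', (c' = x ∨ c' ∈ js') → ∀ y, (y = x ∨ y ∈ js') → y ∉ adj.getD c' PySem.Set.empty := by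
        intro c' hc' y hy
        exact H c' (by rcases hc' with h | h; exact Or.inl h; exact Or.inr (by simp [h])) y
          (by rcases hy with h | h; exact Or.inl h; exact Or.inr (by simp [h]))
      rw [ih adj hnd' hxjs' H'']
      by_cases hcx : c = x
      · subst hcx
        rw [if_pos rfl, if_pos rfl, List.filter_cons, if_neg (by simp [pvQ, hq])]
      · rw [if_neg hcx, if_neg hcx]
        by_cases hccj : c = cj
        · subst hccj
          simp [pvQ, hq, hcjjs]
        · have : (cj :: js').contains c = js'.contains c := by
            simp [hccj]
          rw [this]

-- the inner loop only modifies existing keys, so keys and contains are preserved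
theorem pvInnerB_keys (P : PySem.Dict String (Int × Int)) (x : String) (js : List String)
    (adj : PySem.Dict String (PySem.Set String)) (hx : adj.contains x = true)
    (hjs : ∀ y ∈ js, adj.contains y = true) :
    (js.foldl (fun adjacent cj =>
        if max |(P.getD x (0,0)).1 - (P.getD cj (0,0)).1|
               |(P.getD x (0,0)).2 - (P.getD cj (0,0)).2| ≤ 2 then
          (adjacent.modify x PySem.Set.empty (fun s => PySem.Set.add s cj)).modify cj
            PySem.Set.empty (fun s => PySem.Set.add s x)
        else adjacent) adj).keys = adj.keys
    ∧ ∀ k, (js.foldl (fun adjacent cj =>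
        if max |(P.getD x (0,0)).1 - (P.getD cj (0,0)).1|
               |(P.getD x (0,0)).2 - (P.getD cj (0,0)).2| ≤ 2 then
          (adjacent.modify x PySem.Set.empty (fun s => PySem.Set.add s cj)).modify cj
            PySem.Set.empty (fun s => PySem.Set.add s x)
        else adjacent) adj).contains k = adj.contains k := by
  induction js generalizing adj with
  | nil => exact ⟨rfl, fun _ => rfl⟩
  | cons cj js' ih =>
    rw [List.foldl_cons]
    by_cases hq : max |(P.getD x (0,0)).1 - (P.getD cj (0,0)).1|
                     |(P.getD x (0,0)).2 - (P.getD cj (0,0)).2| ≤ 2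
    · rw [if_pos hq]
      have hcj : adj.contains cj = true := hjs cj (by simp)
      set A1 := (adj.modify x PySem.Set.empty fun s => PySem.Set.add s cj).modify cj
        PySem.Set.empty (fun s => PySem.Set.add s x) with hA1
      have hc1 : ∀ k, A1.contains k = adj.contains k := by
        intro k
        rw [hA1, PySem.Dict.contains_modify, PySem.Dict.contains_modify]
        by_cases h1 : k = cj
        · simp [h1, hcj]
        · have b1 : (k == cj) = false := beq_eq_false_iff_ne.mpr h1
          by_cases h2 : k = x
          · simp [b1, h2, hx]
          · have b2 : (k == x) = false := beq_eq_false_iff_ne.mpr h2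
            simp [b1, b2]
      have hk1 : A1.keys = adj.keys := by
        rw [hA1, PySem.Dict.keys_modify,
            PySem.Dict.keys_insert_of_contains _ _ (by rw [PySem.Dict.contains_modify]; simp [hcj]),
            PySem.Dict.keys_modify, PySem.Dict.keys_insert_of_contains _ _ hx]
      obtain ⟨ka, kb⟩ := ih A1 (by rw [hc1]; exact hx)
        (fun y hy => by rw [hc1]; exact hjs y (by simp [hy]))
      exact ⟨ka.trans hk1, fun k => (kb k).trans (hc1 k)⟩
    · rw [if_neg hq]
      exact ih adj hx (fun y hy => hjs y (by simp [hy]))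

-- keys are untouched by the sweep (every modify hits an existing key)
theorem pvSweep_keys (P : PySem.Dict String (Int × Int)) (rest : List String)
    (adj : PySem.Dict String (PySem.Set String)) (h : ∀ x ∈ rest, adj.contains x = true) :
    (pvSweep P adj rest).keys = adj.keys := by
  induction rest generalizing adj with
  | nil => rfl
  | cons x rest' ih =>
    rw [pvSweep_cons]
    obtain ⟨hk, hc⟩ := pvInnerB_keys P x rest' adj (h x (by simp))
      (fun y hy => h y (by simp [hy]))
    rw [ih _ (fun y hy => by rw [hc]; exact h y (by simp [hy]))]
    exact hk

theorem pvPairs_not_mem (P : PySem.Dict String (Int × Int)) (xs : List String) (c : String)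
    (h : c ∉ xs) : pvPairs P xs c = [] := by
  induction xs with
  | nil => rfl
  | cons x rest ih =>
    have hcx : c ≠ x := by intro hh; exact h (by simp [hh])
    have hcr : c ∉ rest := fun hh => h (by simp [hh])
    rw [pvPairs_cons, if_neg hcx, ih hcr]
    simp [hcr]

theorem pvPairs_eq_filter (P : PySem.Dict String (Int × Int)) (xs : List String) (c : String)
    (hnd : xs.Nodup) (hc : c ∈ xs) :
    pvPairs P xs c = xs.filter (fun y => y != c && pvQ P c y) := by
  induction xs with
  | nil => simp at hc
  | cons x rest ih =>
    by_cases hcx : c = x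
    · subst hcx
      have hcr : c ∉ rest := (List.nodup_cons.mp hnd).1
      rw [pvPairs_cons, if_pos rfl, List.filter_cons, if_neg (by simp)]
      apply List.filter_congr
      intro y hy
      have hyx : (y != c) = true := by
        simp only [bne_iff_ne, ne_eq, decide_eq_true_eq]
        intro hh; subst hh; exact hcr hy
      rw [hyx, Bool.true_and]
    · have hcr : c ∈ rest := by
        rcases List.mem_cons.mp hc with h | h
        · exact absurd h hcx
        · exact h
      rw [pvPairs_cons, if_neg hcx, List.filter_cons,
          ih (List.Nodup.of_cons hnd) hcr]
      have hxc : (x != c) = true := by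
        simp only [bne_iff_ne, ne_eq, decide_eq_true_eq]
        intro hh; exact hcx hh.symm
      by_cases hq : pvQ P x c = true
      · simp [hcr, hq, hxc, pvQ_symm P c x]
      · simp [hcr, hq, hxc, pvQ_symm P c x]

-- the sweep appends exactly the pair contributions
theorem pvSweep_getD (P : PySem.Dict String (Int × Int)) (rest : List String)
    (adj : PySem.Dict String (PySem.Set String)) (hnd : rest.Nodup)
    (H : ∀ c ∈ rest, ∀ y ∈ rest, y ∉ adj.getD c PySem.Set.empty) (c : String) :
    (pvSweep P adj rest).getD c PySem.Set.empty
      = adj.getD c PySem.Set.empty ++ pvPairs P rest c := by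
  induction rest generalizing adj with
  | nil => simp [pvSweep, pvPairs]
  | cons x rest' ih =>
    have hnd' : rest'.Nodup := (List.nodup_cons.mp hnd).2
    have hxr : x ∉ rest' := (List.nodup_cons.mp hnd).1
    rw [pvSweep_cons]
    set A1 := rest'.foldl (fun adjacent cj =>
        if max |(P.getD x (0,0)).1 - (P.getD cj (0,0)).1|
               |(P.getD x (0,0)).2 - (P.getD cj (0,0)).2| ≤ 2 then
          (adjacent.modify x PySem.Set.empty (fun s => PySem.Set.add s cj)).modify cj
            PySem.Set.empty (fun s => PySem.Set.add s x)
        else adjacent) adj with hA1def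
    have hH : ∀ c', (c' = x ∨ c' ∈ rest') → ∀ y, (y = x ∨ y ∈ rest') → y ∉ adj.getD c' PySem.Set.empty := by
      intro c' hc' y hy
      exact H c' (by rcases hc' with h | h; simp [h]; simp [h]) y
        (by rcases hy with h | h; simp [h]; simp [h])
    have hinner := pvInnerB P x rest' adj hnd' hxr hH
    have H1 : ∀ c' ∈ rest', ∀ y ∈ rest', y ∉ A1.getD c' PySem.Set.empty := by
      intro c' hc' y hy
      rw [hA1def, hinner c', if_neg (by intro h; subst h; exact hxr hc')]
      intro hmem
      rcases List.mem_append.mp hmem with h | h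
      · exact H c' (by simp [hc']) y (by simp [hy]) h
      · have : y = x := by
          by_cases hcc : (rest'.contains c' && pvQ P x c') = true
          · rw [if_pos hcc] at h; simpa using h
          · rw [if_neg hcc] at h; simp at h
        subst this
        exact hxr hy
    rw [ih A1 hnd' H1, hA1def, hinner c, pvPairs_cons]
    by_cases hcx : c = x
    · subst hcx
      rw [if_pos rfl, if_pos rfl, pvPairs_not_mem P rest' c hxr, List.append_nil]
    · rw [if_neg hcx, if_neg hcx, List.append_assoc]

-- the initial 26-letter dict of B, and B's core computation
def pvAdj0 : PySem.Dict String (PySem.Set String) :=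
  (PySem.List.pyRange 0 26 1).foldl (fun d i => d.insert (pvLetter i) PySem.Set.empty)
    PySem.Dict.empty

theorem pvAdj0_items : pvAdj0.items = pvLetters.map (fun c => (c, (PySem.Set.empty : PySem.Set String))) := by
  rw [pvAdj0, PySem.Dict.items_foldl_insert_fresh (PySem.List.pyRange 0 26 1) pvLetter
      (fun _ => PySem.Set.empty) PySem.Dict.empty (by intro a _; rfl)
      (by exact pvLetters_nodup)]
  simp only [pvLetters, List.map_map]
  rfl

theorem pvAdj0_keys : pvAdj0.keys = pvLetters := by
  have h := pvAdj0_items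
  simp only [PySem.Dict.keys, h, List.map_map]
  show List.map (fun c => c) pvLetters = pvLetters
  simp

theorem pvAdj0_getD (c : String) : pvAdj0.getD c PySem.Set.empty = PySem.Set.empty := by
  by_cases hc : pvAdj0.contains c = true
  · have hmem : c ∈ pvAdj0.keys := (PySem.Dict.contains_iff_mem_keys _ _).mp hc
    rw [pvAdj0_keys] at hmem
    have hit : (c, (PySem.Set.empty : PySem.Set String)) ∈ pvAdj0.items := by
      rw [pvAdj0_items]
      exact List.mem_map_of_mem hmem
    exact PySem.Dict.getD_of_mem_items _ hit (by rw [pvAdj0_keys]; exact pvLetters_nodup) _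
  · exact PySem.Dict.getD_of_not_contains _ _ (by simpa using hc)

theorem pvB_core (P : PySem.Dict String (Int × Int)) :
    (pvSweep P pvAdj0 (pvAdj0.keys.filter (fun c => P.contains c))).items
      = pvLetters.map (fun c => (c, pvN P c)) := by
  set rest := pvAdj0.keys.filter (fun c => P.contains c) with hrest
  have hrestL : rest = pvLetters.filter (fun c => P.contains c) := by rw [hrest, pvAdj0_keys]
  have hrnd : rest.Nodup := by rw [hrestL]; exact pvLetters_nodup.filter _
  have hcont : ∀ x ∈ rest, pvAdj0.contains x = true := by
    intro x hxm
    rw [PySem.Dict.contains_iff_mem_keys]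
    rw [hrest] at hxm
    exact (List.mem_filter.mp hxm).1
  have hkeysF : (pvSweep P pvAdj0 rest).keys = pvLetters := by
    rw [pvSweep_keys P rest pvAdj0 hcont, pvAdj0_keys]
  have hndF : (pvSweep P pvAdj0 rest).keys.Nodup := by rw [hkeysF]; exact pvLetters_nodup
  rw [PySem.Dict.items_eq_map_keys _ hndF PySem.Set.empty, hkeysF]
  apply List.map_congr_left
  intro c hcmem
  have hgd : (pvSweep P pvAdj0 rest).getD c PySem.Set.empty = pvPairs P rest c := by
    rw [pvSweep_getD P rest pvAdj0 hrnd
        (by intro c' _ y _; rw [pvAdj0_getD c']; simp [PySem.Set.empty]), pvAdj0_getD]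
    rfl
  rw [hgd]
  congr 1
  by_cases hc : P.contains c = true
  · have hcr : c ∈ rest := by
      rw [hrestL]; exact List.mem_filter.mpr ⟨hcmem, by simpa using hc⟩
    rw [pvPairs_eq_filter P rest c hrnd hcr, hrestL, List.filter_filter, pvN]
    apply List.filter_congr
    intro y hy
    cases hyc : (y != c) <;> cases hpy : P.contains y <;> cases hq : pvQ P c y <;>
      simp [pvCondL, hc, hyc, hpy, hq]
  · have hcr : c ∉ rest := by
      rw [hrestL]
      intro hmm
      exact absurd (List.mem_filter.mp hmm).2 (by simpa using hc)
    rw [pvPairs_not_mem P rest c hcr, pvN, eq_comm]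
    rw [List.filter_eq_nil_iff]
    intro y _
    simp [pvCondL, hc]

-- B's result as the same explicit association list
theorem pvB_items (rows : List (List String)) :
    get_adjacent_keys_alt rows = pvLetters.map (fun c => (c, pvN (get_key_positions rows) c)) := by
  exact pvB_core (get_key_positions rows)

theorem pv_main (rows : List (List String)) :
    get_adjacent_keys rows = get_adjacent_keys_alt rows := by
  rw [pvA_items, pvB_items]

-- ===== VERDICT (by name: the statement is the Claim_ definition above) =====
theorem get_adjacent_keys_spec : Claim_equal_get_adjacent_keys := by
  intro rows _
  unfold Spec_get_adjacent_keys
  exact pv_main rows
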